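-- pv_equiv track=rewrite | github.com/valcarvajal/Intro-Programaci-n | N-Reinas.py | calcularHijos
-- ===== SOURCE A (Python) =====
-- def sumaFila(fila):
--     suma = 0
--     for valor in fila:
--         suma += valor
--     return suma > 0
--
-- def sumaDiagonales(tablero,posI,posJ):
--     suma = 0
--     for j in range(1, posJ + 1):
--         if(posI - j >= 0):
--             suma += tablero[posI - j][posJ - j]
--         if(posI + j < len(tablero)):
--             suma += tablero[posI + j][posJ - j]
--     return suma > 0
--
-- def puedoMeterReina(tablero,posI,posJ):
--     SF = sumaFila(tablero[posI]) # Esto va a revisar si en esa fila hay un valor > 0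
--     SD = sumaDiagonales(tablero,posI,posJ) # Esto va a revisar si en las diagonales hay un valor > 0
--     if not (SF + SD):
--         tablero[posI][posJ] = 1
--         return tablero
--     return []
--
-- def sumaColumna(matriz,posCol):
--     suma = 0
--     for i in range(len(matriz)):
--         suma += matriz[i][posCol]
--     return suma
--
-- def calcularHijos(tablero):
--     lista_hijos = []
--     for j in range(len(tablero)):
--         if (not sumaColumna(tablero,j)):
--             for i in range(len(tablero)):
--                 matriz_nueva = [fila[:] for fila in tablero]
--                 resultado = puedoMeterReina(matriz_nueva,i,j)
--                 if resultado != []: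
--                     lista_hijos.append(resultado)
--             return lista_hijos
-- ===== SOURCE B (Python) =====
-- def calcularHijos(tablero):
--     n = len(tablero)
--     j = next((c for c in range(n) if sum(fila[c] for fila in tablero) == 0), None)
--     if j is None:
--         return None
--     rowpos = [sum(fila) > 0 for fila in tablero]
--     diag = [0] * n
--     for r in range(n):
--         fila = tablero[r]
--         for c in range(j):
--             v = fila[c]
--             k = j - c
--             if k <= r:
--                 diag[r - k] += v
--             if r + k < n:
--                 diag[r + k] += v
--     hijos = []
--     for i in range(n):
--         if not rowpos[i] and diag[i] <= 0:
--             hijo = [fila[:] for fila in tablero]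
--             hijo[i][j] = 1
--             hijos.append(hijo)
--     return hijos
-- ===== Notes on version B (the rewrite author's own statement) =====
-- stated objective: alternative
-- what changed: Replaces A's per-candidate re-scans (a fresh board copy plus row-sum and diagonal-gather for every row) by one precomputation pass: a row-occupancy table and a scattered diagonal-sum array built once, after which a single loop over rows emits the children, copying the board only for accepted placements.
import Mathlib
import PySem

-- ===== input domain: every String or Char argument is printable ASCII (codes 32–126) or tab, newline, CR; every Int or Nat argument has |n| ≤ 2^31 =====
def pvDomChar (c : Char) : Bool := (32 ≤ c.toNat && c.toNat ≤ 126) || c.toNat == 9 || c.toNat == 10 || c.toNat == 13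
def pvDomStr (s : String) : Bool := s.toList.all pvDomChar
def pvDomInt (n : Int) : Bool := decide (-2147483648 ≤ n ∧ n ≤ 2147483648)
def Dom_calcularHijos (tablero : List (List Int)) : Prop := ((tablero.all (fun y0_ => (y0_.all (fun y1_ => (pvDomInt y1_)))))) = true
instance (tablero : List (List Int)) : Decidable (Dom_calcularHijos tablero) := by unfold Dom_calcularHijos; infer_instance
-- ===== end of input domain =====

-- B precomputes a row-occupancy table and a scattered diagonal-sum array once, then emits children in a
-- single pass (copying only accepted boards), instead of A's per-candidate board copy and re-scans.


-- ===== PORT A =====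
def sumaFila (fila : List Int) : Bool :=
  decide (fila.foldl (fun suma valor => suma + valor) 0 > 0)

-- 'for j in range(1, posJ + 1)' ported as j = c + 1 over range posJ; 'posI - j >= 0' becomes 'c + 1 ≤ posI'
def sumaDiagonales (tablero : List (List Int)) (posI posJ : Nat) : Bool :=
  decide ((List.range posJ).foldl (fun suma c =>
    let suma := if c + 1 ≤ posI then
        suma + ((tablero.getD (posI - (c + 1)) []).getD (posJ - (c + 1)) 0) else suma
    if posI + (c + 1) < tablero.length then
        suma + ((tablero.getD (posI + (c + 1)) []).getD (posJ - (c + 1)) 0) else suma) 0 > 0)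

-- Python mutates its (already copied) argument; immutably: List.set.  'not (SF + SD)' = both booleans False.
def puedoMeterReina (tablero : List (List Int)) (posI posJ : Nat) : List (List Int) :=
  let SF := sumaFila (tablero.getD posI [])
  let SD := sumaDiagonales tablero posI posJ
  if !(SF || SD) then tablero.set posI ((tablero.getD posI []).set posJ 1) else []

def sumaColumna (matriz : List (List Int)) (posCol : Nat) : Int :=
  (List.range matriz.length).foldl (fun suma i => suma + (matriz.getD i []).getD posCol 0) 0

-- the copy '[fila[:] for fila in tablero]' is the identity on immutable lists
def calcularHijosLoop (tablero : List (List Int)) (j : Nat) : List (List (List Int)) :=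
  if j < tablero.length then
    if sumaColumna tablero j = 0 then
      (List.range tablero.length).foldl (fun lista i =>
        let resultado := puedoMeterReina tablero i j
        if resultado ≠ [] then lista ++ [resultado] else lista) []
    else calcularHijosLoop tablero (j + 1)
  else []  -- Python falls through returning None here; excluded by Pre_
termination_by tablero.length - j

def calcularHijos (tablero : List (List Int)) : List (List (List Int)) :=
  calcularHijosLoop tablero 0

-- ===== PORT B =====
def colSumB (tablero : List (List Int)) (c : Nat) : Int :=
  tablero.foldl (fun s fila => s + fila.getD c 0) 0

-- body of B's inner scatter loop: cell (r, c) feeds diag[r-k] and diag[r+k], k = j - c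
def scatterCell (tablero : List (List Int)) (n j : Nat) (d : List Int) (r c : Nat) : List Int :=
  let v := (tablero.getD r []).getD c 0
  let k := j - c
  let d := if k ≤ r then d.set (r - k) (d.getD (r - k) 0 + v) else d
  if r + k < n then d.set (r + k) (d.getD (r + k) 0 + v) else d

def scatterRow (tablero : List (List Int)) (n j : Nat) (d : List Int) (r : Nat) : List Int :=
  (List.range j).foldl (fun d c => scatterCell tablero n j d r c) d

def diagScatter (tablero : List (List Int)) (n j : Nat) : List Int :=
  (List.range n).foldl (fun d r => scatterRow tablero n j d r) (List.replicate n 0)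

def calcularHijos_alt (tablero : List (List Int)) : List (List (List Int)) :=
  let n := tablero.length
  match (List.range n).find? (fun c => colSumB tablero c == 0) with
  | none => []  -- Python B returns None here; excluded by Pre_
  | some j =>
    let rowpos := tablero.map (fun fila => decide (fila.foldl (fun s v => s + v) 0 > 0))
    let diag := diagScatter tablero n j
    (List.range n).foldl (fun hijos i =>
      if rowpos.getD i false = false ∧ diag.getD i 0 ≤ 0 then
        hijos ++ [tablero.set i ((tablero.getD i []).set j 1)]
      else hijos) []

-- ===== PRECONDITION & SPEC =====
def pvColSum (tablero : List (List Int)) (c : Nat) : Int :=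
  (tablero.map (fun fila => fila.getD c 0)).sum

-- Pre_ = exactly the inputs on which Python A returns a value of the declared type: there is a first
-- column j of sum 0 reached without an IndexError (every row longer than j); otherwise A either raises
-- IndexError on a short row or falls through returning None (not a list).
def Pre_calcularHijos (tablero : List (List Int)) : Prop :=
  ∃ j < tablero.length, (∀ fila ∈ tablero, j < fila.length) ∧
    pvColSum tablero j = 0 ∧ ∀ c < j, pvColSum tablero c ≠ 0

instance (tablero : List (List Int)) : Decidable (Pre_calcularHijos tablero) := by
  unfold Pre_calcularHijos; infer_instance

def pvWitness_calcularHijos : List (List Int) := [[0, 0], [0, 0]]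

def Spec_calcularHijos (tablero : List (List Int)) (out : List (List (List Int))) : Prop := out = calcularHijos_alt tablero
instance (tablero : List (List Int)) (out : List (List (List Int))) : Decidable (Spec_calcularHijos tablero out) := by unfold Spec_calcularHijos; infer_instance

-- ===== CLAIM (what is proved, stated in full; the proofs are below) =====
def Claim_equal_calcularHijos : Prop := ∀ (tablero : List (List Int)), Dom_calcularHijos tablero → Pre_calcularHijos tablero → Spec_calcularHijos tablero (calcularHijos tablero)

-- ===== LEMMAS AND PROOFS =====

theorem map_range_getD {α β : Type} (t : List α) (d : α) (f : α → β) :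
    (List.range t.length).map (fun i => f (t.getD i d)) = t.map f := by
  apply List.ext_getElem
  · simp
  · intro i h1 h2
    have ht : i < t.length := by simpa using h1
    simp [List.getD_eq_getElem?_getD, List.getElem?_eq_getElem ht]

theorem sumaColumna_eq (t : List (List Int)) (c : Nat) :
    sumaColumna t c = pvColSum t c := by
  unfold sumaColumna pvColSum
  rw [PySem.List.foldl_add]
  have h := map_range_getD t [] (fun fila => fila.getD c 0)
  simp only [h]
  simp

theorem colSumB_eq (t : List (List Int)) (c : Nat) :
    colSumB t c = pvColSum t c := by
  unfold colSumB pvColSum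
  rw [PySem.List.foldl_add]; simp

theorem find?_range_first (n j : Nat) (p : Nat → Bool) (hj : j < n) (hpj : p j = true)
    (hfst : ∀ c < j, p c = false) : (List.range n).find? p = some j := by
  have hn : n = j + (n - j) := by omega
  have hm : n - j = (n - j - 1) + 1 := by omega
  rw [hn, List.range_add, List.find?_append]
  have h1 : (List.range j).find? p = none := by
    rw [List.find?_eq_none]
    intro x hx
    simp only [List.mem_range] at hx
    simp [hfst x hx]
  rw [h1, hm, List.range_succ_eq_map]
  simp [hpj]

theorem sum_map_range (n : Nat) (f : Nat → Int) :
    ((List.range n).map f).sum = ∑ x ∈ Finset.range n, f x := by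
  induction n with
  | zero => simp
  | succ m ih => rw [List.range_succ, Finset.sum_range_succ, List.map_append, List.sum_append, ih]; simp

-- one cell's contribution to diag entry i
def pvContrib (t : List (List Int)) (n j r c i : Nat) : Int :=
  let v := (t.getD r []).getD c 0
  let k := j - c
  (if k ≤ r ∧ r - k = i then v else 0) + (if r + k < n ∧ r + k = i then v else 0)

-- the integer A's sumaDiagonales folds up, as a function of the offset k
def pvGather (t : List (List Int)) (i j k : Nat) : Int :=
  (if k ≤ i then (t.getD (i - k) []).getD (j - k) 0 else 0) +
  (if i + k < t.length then (t.getD (i + k) []).getD (j - k) 0 else 0)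

theorem getD_set_int (d : List Int) (p : Nat) (x : Int) (i : Nat) (hp : p < d.length) :
    (d.set p x).getD i 0 = if p = i then x else d.getD i 0 := by
  by_cases h : p = i
  · subst h; simp [List.getD_eq_getElem?_getD, hp]
  · simp [List.getD_eq_getElem?_getD, List.getElem?_set_ne, h]

theorem scatterCell_length (t : List (List Int)) (n j : Nat) (d : List Int) (r c : Nat) :
    (scatterCell t n j d r c).length = d.length := by
  simp only [scatterCell]
  split_ifs <;> simp

theorem scatterCell_getD (t : List (List Int)) (n j : Nat) (d : List Int) (r c i : Nat)
    (hd : d.length = n) (hi : i < n) (hr : r < n) (hc : c < j) :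
    (scatterCell t n j d r c).getD i 0 = d.getD i 0 + pvContrib t n j r c i := by
  unfold scatterCell pvContrib
  have hk : 1 ≤ j - c := by omega
  by_cases h1 : j - c ≤ r <;> by_cases h2 : r + (j - c) < n <;>
    simp only [h1, h2, if_pos, if_neg, not_false_iff]
  · rw [getD_set_int _ _ _ _ (by simp [hd]; omega),
        getD_set_int _ _ _ _ (by rw [hd]; omega),
        getD_set_int _ _ _ _ (by rw [hd]; omega)]
    have hne : r - (j - c) ≠ r + (j - c) := by omega
    by_cases e1 : r + (j - c) = i <;> by_cases e2 : r - (j - c) = i <;>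
      simp [e1, e2, hne] <;> omega
  · rw [getD_set_int _ _ _ _ (by rw [hd]; omega)]
    by_cases e2 : r - (j - c) = i <;> simp [e2, h1, h2] <;> omega
  · rw [getD_set_int _ _ _ _ (by rw [hd]; omega)]
    by_cases e1 : r + (j - c) = i <;> simp [e1, h1, h2] <;> omega
  · simp [h1, h2]

theorem foldl_scatterCell_getD (t : List (List Int)) (n j r i : Nat) (hi : i < n) (hr : r < n) :
    ∀ (cs : List Nat) (d : List Int), d.length = n → (∀ c ∈ cs, c < j) →
    (cs.foldl (fun d c => scatterCell t n j d r c) d).getD i 0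
      = d.getD i 0 + (cs.map (fun c => pvContrib t n j r c i)).sum := by
  intro cs
  induction cs with
  | nil => intro d _ _; simp
  | cons c cs ih =>
    intro d hd hcs
    rw [List.foldl_cons, ih _ (by rw [scatterCell_length]; exact hd) (fun x hx => hcs x (List.mem_cons_of_mem _ hx)),
        scatterCell_getD t n j d r c i hd hi hr (hcs c (List.mem_cons_self ..))]
    simp [add_assoc]

theorem foldl_scatterRow_getD (t : List (List Int)) (n j i : Nat) (hi : i < n) :
    ∀ (rs : List Nat) (d : List Int), d.length = n → (∀ r ∈ rs, r < n) →
    (rs.foldl (fun d r => scatterRow t n j d r) d).getD i 0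
      = d.getD i 0 + (rs.map (fun r => ((List.range j).map (fun c => pvContrib t n j r c i)).sum)).sum := by
  intro rs
  induction rs with
  | nil => intro d _ _; simp
  | cons r rs ih =>
    intro d hd hrs
    have hlen : (scatterRow t n j d r).length = n := by
      unfold scatterRow
      generalize (List.range j) = cs
      induction cs generalizing d with
      | nil => simpa
      | cons c cs ih2 => rw [List.foldl_cons]; exact ih2 _ (by rw [scatterCell_length]; exact hd)
    rw [List.foldl_cons, ih _ hlen (fun x hx => hrs x (List.mem_cons_of_mem _ hx))]
    unfold scatterRow
    rw [foldl_scatterCell_getD t n j r i hi (hrs r (List.mem_cons_self ..)) _ d hd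
        (fun c hc => (List.mem_range.mp hc))]
    simp [add_assoc]

theorem diagScatter_getD (t : List (List Int)) (n j i : Nat) (hi : i < n) :
    (diagScatter t n j).getD i 0 =
      ∑ r ∈ Finset.range n, ∑ c ∈ Finset.range j, pvContrib t n j r c i := by
  unfold diagScatter
  rw [foldl_scatterRow_getD t n j i hi _ _ (by simp) (fun r hr => List.mem_range.mp hr)]
  have h0 : (List.replicate n (0:Int)).getD i 0 = 0 := by
    simp [List.getD_eq_getElem?_getD, List.getElem?_replicate, hi]
  rw [h0, sum_map_range]
  simp only [zero_add]
  exact Finset.sum_congr rfl (fun r _ => sum_map_range j _)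

theorem sumaDiagonales_eq (t : List (List Int)) (i j : Nat) :
    sumaDiagonales t i j = decide ((∑ c ∈ Finset.range j, pvGather t i j (c + 1)) > 0) := by
  unfold sumaDiagonales
  have hstep : (List.range j).foldl (fun suma c =>
      let suma := if c + 1 ≤ i then
          suma + ((t.getD (i - (c + 1)) []).getD (j - (c + 1)) 0) else suma
      if i + (c + 1) < t.length then
          suma + ((t.getD (i + (c + 1)) []).getD (j - (c + 1)) 0) else suma) 0
      = (List.range j).foldl (fun suma c => suma + pvGather t i j (c + 1)) 0 := by
    apply PySem.List.foldl_congr_mem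
    intro acc c _
    simp only [pvGather]
    split_ifs <;> ring
  rw [hstep, PySem.List.foldl_add, sum_map_range]
  simp

theorem contrib_col_sum (t : List (List Int)) (j i c : Nat) (hi : i < t.length) (hc : c < j) :
    ∑ r ∈ Finset.range t.length, pvContrib t t.length j r c i = pvGather t i j (j - c) := by
  unfold pvContrib pvGather
  rw [Finset.sum_add_distrib]
  have hk1 : 1 ≤ j - c := by omega
  have hjc : j - (j - c) = c := by omega
  have h1 : ∑ r ∈ Finset.range t.length,
      (if j - c ≤ r ∧ r - (j - c) = i then (t.getD r []).getD c 0 else 0)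
      = (if i + (j - c) < t.length then (t.getD (i + (j - c)) []).getD c 0 else 0) := by
    rw [Finset.sum_congr rfl (g := fun r => if r = i + (j - c) then (t.getD r []).getD c 0 else 0)
        (fun r _ => by beta_reduce; split_ifs <;> first | rfl | omega)]
    rw [Finset.sum_ite_eq' (Finset.range t.length) (i + (j - c)) (fun r => (t.getD r []).getD c 0)]
    simp [Finset.mem_range]
  have h2 : ∑ r ∈ Finset.range t.length,
      (if r + (j - c) < t.length ∧ r + (j - c) = i then (t.getD r []).getD c 0 else 0)
      = (if j - c ≤ i then (t.getD (i - (j - c)) []).getD c 0 else 0) := by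
    by_cases hki : j - c ≤ i
    · rw [Finset.sum_congr rfl (g := fun r => if r = i - (j - c) then (t.getD r []).getD c 0 else 0)
          (fun r _ => by beta_reduce; split_ifs <;> first | rfl | omega)]
      rw [Finset.sum_ite_eq' (Finset.range t.length) (i - (j - c)) (fun r => (t.getD r []).getD c 0)]
      simp only [Finset.mem_range, hki, if_pos]
      rw [if_pos (by omega)]
    · rw [if_neg hki]
      apply Finset.sum_eq_zero
      intro r _
      rw [if_neg (by omega)]
  rw [h1, h2, hjc]
  ring

theorem scatter_sum_eq (t : List (List Int)) (j i : Nat) (hi : i < t.length) :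
    ∑ r ∈ Finset.range t.length, ∑ c ∈ Finset.range j, pvContrib t t.length j r c i
      = ∑ c ∈ Finset.range j, pvGather t i j (c + 1) := by
  rw [Finset.sum_comm]
  rw [Finset.sum_congr rfl (fun c hc => contrib_col_sum t j i c hi (Finset.mem_range.mp hc))]
  rw [Finset.sum_congr rfl (g := fun c => pvGather t i j (j - 1 - c + 1))
      (fun c hc => by
        have h : j - c = j - 1 - c + 1 := by have := Finset.mem_range.mp hc; omega
        rw [h])]
  exact Finset.sum_range_reflect (fun c => pvGather t i j (c + 1)) j

theorem getD_map_decide (t : List (List Int)) (i : Nat) (hi : i < t.length) :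
    (t.map (fun fila => decide (fila.foldl (fun s v => s + v) 0 > 0))).getD i false
      = sumaFila (t.getD i []) := by
  unfold sumaFila
  simp [List.getD_eq_getElem?_getD, List.getElem?_eq_getElem hi]

-- the two children folds agree
theorem children_fold_eq (t : List (List Int)) (j : Nat) :
    (List.range t.length).foldl (fun lista i =>
        let resultado := puedoMeterReina t i j
        if resultado ≠ [] then lista ++ [resultado] else lista) []
    = (List.range t.length).foldl (fun hijos i =>
        if (t.map (fun fila => decide (fila.foldl (fun s v => s + v) 0 > 0))).getD i false = false
            ∧ (diagScatter t t.length j).getD i 0 ≤ 0 then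
          hijos ++ [t.set i ((t.getD i []).set j 1)]
        else hijos) [] := by
  apply PySem.List.foldl_congr_mem
  intro acc i hmem
  have hi : i < t.length := List.mem_range.mp hmem
  have hdiag : (diagScatter t t.length j).getD i 0 = ∑ c ∈ Finset.range j, pvGather t i j (c + 1) := by
    rw [diagScatter_getD t t.length j i hi, scatter_sum_eq t j i hi]
  beta_reduce
  simp only [puedoMeterReina, getD_map_decide t i hi, sumaDiagonales_eq, hdiag]
  have ht : ¬ t = [] := by intro h; rw [h] at hi; simp at hi
  have ht : ¬ t = [] := by intro h; rw [h] at hi; simp at hi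
  by_cases hSF : sumaFila (t[i]?.getD []) = false <;>
    by_cases hS : (∑ c ∈ Finset.range j, pvGather t i j (c + 1)) ≤ 0
  · have hd : ¬ ((∑ c ∈ Finset.range j, pvGather t i j (c + 1)) > 0) := by omega
    simp [hSF, hd, hS, ht]
  · have hd : (∑ c ∈ Finset.range j, pvGather t i j (c + 1)) > 0 := by omega
    simp [hSF, hd, hS]
  · simp [eq_true_of_ne_false hSF]
  · simp [eq_true_of_ne_false hSF]

theorem loopA_skip (t : List (List Int)) (j₀ : Nat)
    (hf : ∀ c < j₀, pvColSum t c ≠ 0) (h₀ : j₀ < t.length) :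
    ∀ m j, j + m = j₀ → calcularHijosLoop t j = calcularHijosLoop t j₀ := by
  intro m
  induction m with
  | zero => intro j h; rw [show j = j₀ by omega]
  | succ k ih =>
    intro j h
    rw [calcularHijosLoop, if_pos (by omega : j < t.length),
        if_neg (by rw [sumaColumna_eq]; exact hf j (by omega))]
    exact ih (j + 1) (by omega)

theorem calcularHijos_spec' (t : List (List Int)) (h : Pre_calcularHijos t) :
    calcularHijos t = calcularHijos_alt t := by
  obtain ⟨j₀, h₀, _, hz, hf⟩ := h
  have hfind : (List.range t.length).find? (fun c => colSumB t c == 0) = some j₀ := by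
    apply find?_range_first _ _ _ h₀
    · simp [colSumB_eq, hz]
    · intro c hc
      simp [colSumB_eq]
      exact hf c hc
  have hA : calcularHijos t =
      (List.range t.length).foldl (fun lista i =>
        let resultado := puedoMeterReina t i j₀
        if resultado ≠ [] then lista ++ [resultado] else lista) [] := by
    unfold calcularHijos
    rw [loopA_skip t j₀ hf h₀ j₀ 0 (by omega), calcularHijosLoop, if_pos h₀,
        if_pos (by rw [sumaColumna_eq]; exact hz)]
  have hB : calcularHijos_alt t =
      (List.range t.length).foldl (fun hijos i =>
        if (t.map (fun fila => decide (fila.foldl (fun s v => s + v) 0 > 0))).getD i false = false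
            ∧ (diagScatter t t.length j₀).getD i 0 ≤ 0 then
          hijos ++ [t.set i ((t.getD i []).set j₀ 1)]
        else hijos) [] := by
    unfold calcularHijos_alt
    simp only [hfind]
  rw [hA, hB]
  exact children_fold_eq t j₀

-- ===== VERDICT (by name: the statement is the Claim_ definition above) =====
theorem calcularHijos_spec : Claim_equal_calcularHijos := by
  intro t _ hpre
  unfold Spec_calcularHijos
  exact calcularHijos_spec' t hpre
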